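-- pv_equiv track=rewrite | github.com/zengtianli/scripts | scripts/document/docx_tools.py | compare_zip_integrity
-- ===== SOURCE A (Python) =====
-- EXPECTED_CHANGES = {"word/document.xml", "word/comments.xml"}
--
-- SAFE_SIDE_EFFECTS = {
--     "[Content_Types].xml",  # 新增 comments 内容类型声明
--     "word/_rels/document.xml.rels",  # 新增 comments 关系
--     "docProps/core.xml",  # 修订号+1，修改时间更新
--     "docProps/app.xml",  # 行数/段落数统计更新
--     "word/settings.xml",  # rsid 修订标识更新
--     "word/endnotes.xml",  # rsid 变化
--     "word/footnotes.xml",  # rsid 变化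
--     "word/commentsExtended.xml",  # 批注扩展元数据（新增）
--     "word/commentsIds.xml",  # 批注 ID 映射（新增）
-- }
--
-- def compare_zip_integrity(hashes_before: dict, hashes_after: dict) -> list[dict]:
--     """对比两份 hash，返回差异列表"""
--     diffs = []
--     all_keys = set(hashes_before) | set(hashes_after)
--     for key in sorted(all_keys):
--         h1 = hashes_before.get(key)
--         h2 = hashes_after.get(key)
--         if h1 == h2:
--             continue
--         if key in EXPECTED_CHANGES:
--             level = "expected"
--         elif key in SAFE_SIDE_EFFECTS:
--             level = "safe"
--         else:
--             level = "unexpected"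
--
--         if h1 is None:
--             diffs.append({"file": key, "type": "added", "level": level})
--         elif h2 is None:
--             diffs.append({"file": key, "type": "removed", "level": level})
--         else:
--             diffs.append({"file": key, "type": "changed", "level": level})
--     return diffs
-- ===== SOURCE B (Python) =====
-- EXPECTED_CHANGES = {"word/document.xml", "word/comments.xml"}
--
-- SAFE_SIDE_EFFECTS = {
--     "[Content_Types].xml",
--     "word/_rels/document.xml.rels",
--     "docProps/core.xml",
--     "docProps/app.xml",
--     "word/settings.xml",
--     "word/endnotes.xml",
--     "word/footnotes.xml",
--     "word/commentsExtended.xml",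
--     "word/commentsIds.xml",
-- }
--
-- def compare_zip_integrity(hashes_before: dict, hashes_after: dict) -> list[dict]:
--     """对比两份 hash，返回差异列表 (set-algebra partition of the keys)"""
--     before, after = set(hashes_before), set(hashes_after)
--     added = after - before
--     removed = before - after
--     changed = {k for k in before & after if hashes_before[k] != hashes_after[k]}
--
--     def typ(k):
--         return "added" if k in added else "removed" if k in removed else "changed"
--
--     def level(k):
--         return ("expected" if k in EXPECTED_CHANGES
--                 else "safe" if k in SAFE_SIDE_EFFECTS
--                 else "unexpected")
--
--     return [{"file": k, "type": typ(k), "level": level(k)}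
--             for k in sorted(added | removed | changed)]
-- ===== Notes on version B (the rewrite author's own statement) =====
-- stated objective: idiomatic
-- what changed: Replaces A's single pass that re-derives each key's status from two None-able lookups inside the loop by a set-algebra partition (added/removed/changed computed up front with set difference/intersection) followed by a map over the sorted union of those three sets.
import Mathlib
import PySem

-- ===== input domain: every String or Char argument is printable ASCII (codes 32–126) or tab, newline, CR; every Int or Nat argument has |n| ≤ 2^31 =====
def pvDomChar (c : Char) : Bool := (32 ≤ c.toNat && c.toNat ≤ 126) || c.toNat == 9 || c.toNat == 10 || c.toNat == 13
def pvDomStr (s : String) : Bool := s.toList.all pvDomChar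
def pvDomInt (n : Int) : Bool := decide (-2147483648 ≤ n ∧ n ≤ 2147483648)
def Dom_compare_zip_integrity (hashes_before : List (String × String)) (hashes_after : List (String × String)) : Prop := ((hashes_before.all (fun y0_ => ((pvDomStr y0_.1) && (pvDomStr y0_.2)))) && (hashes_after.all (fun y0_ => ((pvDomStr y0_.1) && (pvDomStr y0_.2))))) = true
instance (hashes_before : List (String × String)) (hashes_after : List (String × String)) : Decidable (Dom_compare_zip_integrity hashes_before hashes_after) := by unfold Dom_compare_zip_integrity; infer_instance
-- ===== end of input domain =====

-- B replaces A's per-key None-comparison pass by a set-algebra partition of the keys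
-- (added / removed / changed computed up front); same result, idiomatic decomposition.

-- ===== PORT A =====
def pvEXPECTED_CHANGES : PySem.Set String :=
  PySem.Set.ofList ["word/document.xml", "word/comments.xml"]

def pvSAFE_SIDE_EFFECTS : PySem.Set String :=
  PySem.Set.ofList ["[Content_Types].xml", "word/_rels/document.xml.rels", "docProps/core.xml",
    "docProps/app.xml", "word/settings.xml", "word/endnotes.xml", "word/footnotes.xml",
    "word/commentsExtended.xml", "word/commentsIds.xml"]

def compare_zip_integrity (hashes_before : List (String × String)) (hashes_after : List (String × String)) : List (List (String × String)) :=
  let d1 := PySem.Dict.ofList hashes_before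
  let d2 := PySem.Dict.ofList hashes_after
  let all_keys := PySem.Set.union (PySem.Set.ofList (PySem.Dict.keys d1)) (PySem.Set.ofList (PySem.Dict.keys d2))
  (PySem.List.sorted all_keys (fun k => k) false).foldl (fun diffs key =>
    let h1 := PySem.Dict.get? d1 key
    let h2 := PySem.Dict.get? d2 key
    if h1 == h2 then diffs
    else
      let level := if PySem.Set.contains pvEXPECTED_CHANGES key then "expected"
        else if PySem.Set.contains pvSAFE_SIDE_EFFECTS key then "safe"
        else "unexpected"
      if h1 == none then diffs ++ [[("file", key), ("type", "added"), ("level", level)]]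
      else if h2 == none then diffs ++ [[("file", key), ("type", "removed"), ("level", level)]]
      else diffs ++ [[("file", key), ("type", "changed"), ("level", level)]]) []

-- ===== PORT B =====
def pvLevel (k : String) : String :=
  if PySem.Set.contains pvEXPECTED_CHANGES k then "expected"
  else if PySem.Set.contains pvSAFE_SIDE_EFFECTS k then "safe"
  else "unexpected"

def compare_zip_integrity_alt (hashes_before : List (String × String)) (hashes_after : List (String × String)) : List (List (String × String)) :=
  let d1 := PySem.Dict.ofList hashes_before
  let d2 := PySem.Dict.ofList hashes_after
  let before := PySem.Set.ofList (PySem.Dict.keys d1)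
  let after := PySem.Set.ofList (PySem.Dict.keys d2)
  let added := PySem.Set.diff after before
  let removed := PySem.Set.diff before after
  -- hashes_before[k] != hashes_after[k]: k is in both dicts here, so get? is exact (never raises)
  let changed := (PySem.Set.inter before after).filter (fun k => !(PySem.Dict.get? d1 k == PySem.Dict.get? d2 k))
  (PySem.List.sorted (PySem.Set.union (PySem.Set.union added removed) changed) (fun k => k) false).map
    (fun k =>
      [("file", k),
       ("type", if PySem.Set.contains added k then "added"
                else if PySem.Set.contains removed k then "removed"
                else "changed"),
       ("level", pvLevel k)])

-- ===== PRECONDITION & SPEC =====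
def Spec_compare_zip_integrity (hashes_before : List (String × String)) (hashes_after : List (String × String)) (out : List (List (String × String))) : Prop := out = compare_zip_integrity_alt hashes_before hashes_after
instance (hashes_before : List (String × String)) (hashes_after : List (String × String)) (out : List (List (String × String))) : Decidable (Spec_compare_zip_integrity hashes_before hashes_after out) := by unfold Spec_compare_zip_integrity; infer_instance

-- ===== CLAIM (what is proved, stated in full; the proofs are below) =====
def Claim_equal_compare_zip_integrity : Prop := ∀ (hashes_before : List (String × String)) (hashes_after : List (String × String)), Dom_compare_zip_integrity hashes_before hashes_after → Spec_compare_zip_integrity hashes_before hashes_after (compare_zip_integrity hashes_before hashes_after)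

-- ===== LEMMAS AND PROOFS =====

-- the predicate and record-builder A's loop computes per key
def pvP (d1 d2 : PySem.Dict String String) (k : String) : Bool :=
  !(PySem.Dict.get? d1 k == PySem.Dict.get? d2 k)

def pvF (d1 d2 : PySem.Dict String String) (k : String) : List (String × String) :=
  [("file", k),
   ("type", if PySem.Dict.get? d1 k == none then "added"
            else if PySem.Dict.get? d2 k == none then "removed"
            else "changed"),
   ("level", pvLevel k)]

-- A's loop body is "append pvF when pvP"
theorem pvStepA_eq (d1 d2 : PySem.Dict String String) :
    (fun (diffs : List (List (String × String))) (key : String) =>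
      let h1 := PySem.Dict.get? d1 key
      let h2 := PySem.Dict.get? d2 key
      if h1 == h2 then diffs
      else
        let level := if PySem.Set.contains pvEXPECTED_CHANGES key then "expected"
          else if PySem.Set.contains pvSAFE_SIDE_EFFECTS key then "safe"
          else "unexpected"
        if h1 == none then diffs ++ [[("file", key), ("type", "added"), ("level", level)]]
        else if h2 == none then diffs ++ [[("file", key), ("type", "removed"), ("level", level)]]
        else diffs ++ [[("file", key), ("type", "changed"), ("level", level)]])
    = fun diffs key => if pvP d1 d2 key then diffs ++ [pvF d1 d2 key] else diffs := by
  funext diffs key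
  simp only [pvP, pvF, pvLevel]
  by_cases h : PySem.Dict.get? d1 key == PySem.Dict.get? d2 key <;>
    by_cases h1n : PySem.Dict.get? d1 key == none <;>
      by_cases h2n : PySem.Dict.get? d2 key == none <;>
        simp [h, h1n, h2n]

theorem main_eq (hashes_before hashes_after : List (String × String)) :
    compare_zip_integrity hashes_before hashes_after
      = compare_zip_integrity_alt hashes_before hashes_after := by
  unfold compare_zip_integrity compare_zip_integrity_alt
  simp only [pvStepA_eq, PySem.List.foldl_append_if, List.nil_append]
  set d1 := PySem.Dict.ofList hashes_before with hd1
  set d2 := PySem.Dict.ofList hashes_after with hd2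
  set before := PySem.Set.ofList (PySem.Dict.keys d1) with hbef
  set after := PySem.Set.ofList (PySem.Dict.keys d2) with haft
  have hsome1 : ∀ k, k ∈ PySem.Dict.keys d1 ↔ PySem.Dict.get? d1 k ≠ none := by
    intro k
    rw [Ne, PySem.Dict.get?_eq_none_iff_not_mem_keys, not_not]
  have hsome2 : ∀ k, k ∈ PySem.Dict.keys d2 ↔ PySem.Dict.get? d2 k ≠ none := by
    intro k
    rw [Ne, PySem.Dict.get?_eq_none_iff_not_mem_keys, not_not]
  -- the key list B iterates over
  set dks := PySem.Set.union (PySem.Set.union (PySem.Set.diff after before) (PySem.Set.diff before after))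
      ((PySem.Set.inter before after).filter (fun k => !(PySem.Dict.get? d1 k == PySem.Dict.get? d2 k))) with hdks
  have hmem_dks : ∀ k, k ∈ dks ↔ (k ∈ before ∨ k ∈ after) ∧ PySem.Dict.get? d1 k ≠ PySem.Dict.get? d2 k := by
    intro k
    rw [hdks, PySem.Set.mem_union, PySem.Set.mem_union, PySem.Set.mem_diff, PySem.Set.mem_diff,
      List.mem_filter, PySem.Set.mem_inter]
    constructor
    · rintro ((⟨ha, hb⟩ | ⟨hb, ha⟩) | ⟨⟨hb, ha⟩, hne⟩)
      · refine ⟨Or.inr ha, ?_⟩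
        rw [hbef, PySem.Set.mem_ofList] at hb
        rw [haft, PySem.Set.mem_ofList, hsome2] at ha
        rw [(PySem.Dict.get?_eq_none_iff_not_mem_keys d1 k).2 hb]
        exact fun h => ha h.symm
      · refine ⟨Or.inl hb, ?_⟩
        rw [haft, PySem.Set.mem_ofList] at ha
        rw [hbef, PySem.Set.mem_ofList, hsome1] at hb
        rw [(PySem.Dict.get?_eq_none_iff_not_mem_keys d2 k).2 ha]
        exact hb
      · simpa using ⟨Or.inl hb, by simpa using hne⟩
    · rintro ⟨hor, hne⟩
      by_cases hb : k ∈ before <;> by_cases ha : k ∈ after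
      · exact Or.inr ⟨⟨hb, ha⟩, by simpa using hne⟩
      · exact Or.inl (Or.inr ⟨hb, ha⟩)
      · exact Or.inl (Or.inl ⟨ha, hb⟩)
      · rcases hor with h | h <;> [exact absurd h hb; exact absurd h ha]
  have hnodup_dks : dks.Nodup :=
    PySem.Set.nodup_union _ _ (PySem.Set.nodup_union _ _
      (PySem.Set.nodup_diff _ _ (PySem.Set.nodup_ofList _)))
  -- A's filtered sorted key list equals B's sorted key list
  have hkeys : List.filter (pvP d1 d2)
      (PySem.List.sorted (PySem.Set.union before after) (fun k => k) false)
      = PySem.List.sorted dks (fun k => k) false := by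
    symm
    apply PySem.List.sorted_eq_of_perm_of_pairwise_lt
    · have hnodupA : (List.filter (pvP d1 d2)
          (PySem.List.sorted (PySem.Set.union before after) (fun k => k) false)).Nodup :=
        List.Nodup.filter _
          (((PySem.List.sorted_perm (PySem.Set.union before after) (fun k => k) false).nodup_iff).2
            (PySem.Set.nodup_union _ _ (PySem.Set.nodup_ofList _)))
      rw [List.perm_ext_iff_of_nodup hnodupA hnodup_dks]
      intro k
      rw [List.mem_filter, PySem.List.mem_sorted, PySem.Set.mem_union, hmem_dks]
      simp only [pvP]
      constructor
      · rintro ⟨hor, hp⟩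
        exact ⟨hor, by simpa using hp⟩
      · rintro ⟨hor, hne⟩
        exact ⟨hor, by simpa using hne⟩
    · have hle := (PySem.List.sorted_pairwise (PySem.Set.union before after) (fun k => k)).filter (pvP d1 d2)
      have hnd : (List.filter (pvP d1 d2)
          (PySem.List.sorted (PySem.Set.union before after) (fun k => k) false)).Nodup :=
        List.Nodup.filter _
          (((PySem.List.sorted_perm (PySem.Set.union before after) (fun k => k) false).nodup_iff).2
            (PySem.Set.nodup_union _ _ (PySem.Set.nodup_ofList _)))
      exact (hle.and hnd).imp (fun h => lt_of_le_of_ne h.1 h.2)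
  rw [hkeys]
  -- per key, A's record equals B's record
  apply List.map_congr_left
  intro k hk
  rw [PySem.List.mem_sorted] at hk
  rw [hmem_dks] at hk
  obtain ⟨hor, hne⟩ := hk
  simp only [pvF]
  rcases h1 : PySem.Dict.get? d1 k with _ | v1 <;> rcases h2 : PySem.Dict.get? d2 k with _ | v2
  · rw [h1, h2] at hne; exact absurd rfl hne
  · -- added
    have hb : k ∉ before := by
      rw [hbef, PySem.Set.mem_ofList]
      exact (PySem.Dict.get?_eq_none_iff_not_mem_keys d1 k).1 h1
    have ha : k ∈ after := hor.resolve_left hb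
    simp [ha, hb]
  · -- removed
    have ha : k ∉ after := by
      rw [haft, PySem.Set.mem_ofList]
      exact (PySem.Dict.get?_eq_none_iff_not_mem_keys d2 k).1 h2
    have hb : k ∈ before := hor.resolve_right ha
    simp [ha, hb]
  · -- changed
    have hb : k ∈ before := by
      rw [hbef, PySem.Set.mem_ofList, hsome1, h1]; simp
    have ha : k ∈ after := by
      rw [haft, PySem.Set.mem_ofList, hsome2, h2]; simp
    simp [ha, hb]

-- ===== VERDICT (by name: the statement is the Claim_ definition above) =====
theorem compare_zip_integrity_spec : Claim_equal_compare_zip_integrity := by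
  intro hashes_before hashes_after _
  unfold Spec_compare_zip_integrity
  exact main_eq hashes_before hashes_after
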